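-- pv_equiv track=rewrite | github.com/YinY1/CS61A-su22 | homework/hw03/hw03.py | repeat_digits
-- ===== SOURCE A (Python) =====
-- def repeat_digits(n):
--     """Summer 2018 MT1 Q5a: Won't You Be My Neighbor?"""
--
--     """Given a positive integer N, returns a number with each digit repeated.
--     >>> repeat_digits(1234)
--     11223344
--     """
--     last, rest = n % 10*11, n//10
--     if n < 10:
--         return n
--     return repeat_digits(rest)*100+last
-- ===== SOURCE B (Python) =====
-- def repeat_digits(n):
--     """Summer 2018 MT1 Q5a: Won't You Be My Neighbor?"""
--     if n < 10:
--         return n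
--     # collect all digits except the leading one, least-significant first
--     digits = []
--     m = n
--     while m >= 10:
--         digits.append(m % 10)
--         m //= 10
--     # rebuild most-significant first, doubling each non-leading digit
--     result = m
--     for d in reversed(digits):
--         result = result * 100 + d * 11
--     return result
-- ===== Notes on version B (the rewrite author's own statement) =====
-- stated objective: alternative
-- what changed: Replaces A's right-to-left recursion by an explicit digit stack: a while loop collects the non-leading digits, then a loop rebuilds the number most-significant first, doubling each non-leading digit (matching A's quirk that the leading digit is not doubled).
import Mathlib
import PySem

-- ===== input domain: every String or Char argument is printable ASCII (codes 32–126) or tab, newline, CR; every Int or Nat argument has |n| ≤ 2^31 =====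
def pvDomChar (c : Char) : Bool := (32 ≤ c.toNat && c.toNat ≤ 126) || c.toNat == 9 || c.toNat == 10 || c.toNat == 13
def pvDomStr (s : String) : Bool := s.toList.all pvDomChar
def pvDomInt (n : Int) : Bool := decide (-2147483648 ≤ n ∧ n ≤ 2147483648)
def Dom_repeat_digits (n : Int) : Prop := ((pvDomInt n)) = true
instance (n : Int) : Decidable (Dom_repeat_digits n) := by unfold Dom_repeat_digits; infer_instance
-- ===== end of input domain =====

-- B replaces A's right-to-left recursion by an explicit digit stack and two loops (alternative decomposition, same cost).
-- Both programs are total; equivalence is proved for every Int.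

-- termination helper used by both ports' recursions
theorem pvFloordivTen_toNat_lt (n : Int) (h : ¬ n < 10) :
    (PySem.Int.floordiv n 10).toNat < n.toNat := by
  rw [PySem.Int.floordiv_eq_ediv_of_pos (by omega : (0:Int) < 10)]
  omega

-- ===== PORT A =====
def repeat_digits (n : Int) : Int :=
  let last := PySem.Int.mod n 10 * 11
  let rest := PySem.Int.floordiv n 10
  if n < 10 then n
  else repeat_digits rest * 100 + last
termination_by n.toNat
decreasing_by exact pvFloordivTen_toNat_lt n (by assumption)

-- ===== PORT B =====
-- the while loop: collect the non-leading digits least-significant first; returns (leading part, digit list)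
def pvCollect (m : Int) (acc : List Int) : Int × List Int :=
  if h : m ≥ 10 then pvCollect (PySem.Int.floordiv m 10) (acc ++ [PySem.Int.mod m 10])
  else (m, acc)
termination_by m.toNat
decreasing_by exact pvFloordivTen_toNat_lt m (by omega)

def repeat_digits_alt (n : Int) : Int :=
  if n < 10 then n
  else
    let p := pvCollect n []
    -- for d in reversed(digits): result = result * 100 + d * 11
    p.2.reverse.foldl (fun r d => r * 100 + d * 11) p.1

-- ===== PRECONDITION & SPEC =====
def Spec_repeat_digits (n : Int) (out : Int) : Prop := out = repeat_digits_alt n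
instance (n : Int) (out : Int) : Decidable (Spec_repeat_digits n out) := by unfold Spec_repeat_digits; infer_instance

-- ===== CLAIM (what is proved, stated in full; the proofs are below) =====
def Claim_equal_repeat_digits : Prop := ∀ (n : Int), Dom_repeat_digits n → Spec_repeat_digits n (repeat_digits n)

-- ===== LEMMAS AND PROOFS =====

theorem pvCollect_acc : ∀ (N : Nat) (m : Int), m.toNat ≤ N →
    ∀ acc, pvCollect m acc = ((pvCollect m []).1, acc ++ (pvCollect m []).2) := by
  intro N
  induction N with
  | zero =>
      intro m hm acc
      have h : ¬ m ≥ 10 := by omega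
      rw [pvCollect, dif_neg h, pvCollect, dif_neg h]
      simp
  | succ N ih =>
      intro m hm acc
      by_cases h : m ≥ 10
      · have e : ∀ a, pvCollect m a =
            pvCollect (PySem.Int.floordiv m 10) (a ++ [PySem.Int.mod m 10]) := by
          intro a; rw [pvCollect, dif_pos h]
        have hlt := pvFloordivTen_toNat_lt m (by omega)
        rw [e acc, e [], ih _ (by omega) (acc ++ [PySem.Int.mod m 10]),
          ih _ (by omega) ([] ++ [PySem.Int.mod m 10])]
        simp
      · rw [pvCollect, dif_neg h, pvCollect, dif_neg h]
        simp

theorem repeat_digits_alt_rec (n : Int) (h : ¬ n < 10) :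
    repeat_digits_alt n =
      repeat_digits_alt (PySem.Int.floordiv n 10) * 100 + PySem.Int.mod n 10 * 11 := by
  have hcol : pvCollect n [] =
      ((pvCollect (PySem.Int.floordiv n 10) []).1,
        PySem.Int.mod n 10 :: (pvCollect (PySem.Int.floordiv n 10) []).2) := by
    rw [pvCollect, dif_pos (by omega : n ≥ 10),
      pvCollect_acc (PySem.Int.floordiv n 10).toNat _ le_rfl]
    simp
  simp only [repeat_digits_alt, if_neg h, hcol]
  rw [List.reverse_cons, List.foldl_append]
  by_cases h10 : PySem.Int.floordiv n 10 < 10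
  · have hbase : pvCollect (PySem.Int.floordiv n 10) [] = (PySem.Int.floordiv n 10, []) := by
      rw [pvCollect, dif_neg (by omega)]
    simp only [if_pos h10, hbase, List.reverse_nil, List.foldl_nil, List.foldl_cons]
  · simp only [if_neg h10, List.foldl_cons, List.foldl_nil]

theorem repeat_digits_eq_alt : ∀ (N : Nat) (n : Int), n.toNat ≤ N →
    repeat_digits n = repeat_digits_alt n := by
  intro N
  induction N with
  | zero =>
      intro n hn
      have h : n < 10 := by omega
      rw [repeat_digits, repeat_digits_alt]
      simp [h]
  | succ N ih =>
      intro n hn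
      by_cases h : n < 10
      · rw [repeat_digits, repeat_digits_alt]; simp [h]
      · rw [repeat_digits]
        simp only [h, if_false]
        rw [repeat_digits_alt_rec n h,
          ih (PySem.Int.floordiv n 10) (by have := pvFloordivTen_toNat_lt n h; omega)]

-- ===== VERDICT (by name: the statement is the Claim_ definition above) =====
theorem repeat_digits_spec : Claim_equal_repeat_digits := by
  intro n _
  exact repeat_digits_eq_alt n.toNat n le_rfl
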